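-- pv_equiv track=rewrite | github.com/chris-france/AI_Public_Prototypes | local-rag-system/backend/ingest.py | char_offset_to_page
-- ===== SOURCE A (Python) =====
-- def char_offset_to_page(offset: int, page_map: dict[int, int] | None) -> int | None:
--     if page_map is None:
--         return None
--     page = None
--     for start, pg in sorted(page_map.items()):
--         if start <= offset:
--             page = pg
--         else:
--             break
--     return page
-- ===== SOURCE B (Python) =====
-- def char_offset_to_page(offset: int, page_map: dict[int, int] | None) -> int | None:
--     # One pass, no sort: keep the qualifying item with the largest start.
--     if page_map is None:
--         return None
--     best = None  # (start, pg) with the largest start <= offset seen so far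
--     for start, pg in page_map.items():
--         if start <= offset and (best is None or start > best[0]):
--             best = (start, pg)
--     return None if best is None else best[1]
-- ===== Notes on version B (the rewrite author's own statement) =====
-- stated objective: faster
-- what changed: Replaces sort-then-scan-with-break by a single unsorted pass that tracks the qualifying (start, pg) pair with the maximal start.
import Mathlib
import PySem

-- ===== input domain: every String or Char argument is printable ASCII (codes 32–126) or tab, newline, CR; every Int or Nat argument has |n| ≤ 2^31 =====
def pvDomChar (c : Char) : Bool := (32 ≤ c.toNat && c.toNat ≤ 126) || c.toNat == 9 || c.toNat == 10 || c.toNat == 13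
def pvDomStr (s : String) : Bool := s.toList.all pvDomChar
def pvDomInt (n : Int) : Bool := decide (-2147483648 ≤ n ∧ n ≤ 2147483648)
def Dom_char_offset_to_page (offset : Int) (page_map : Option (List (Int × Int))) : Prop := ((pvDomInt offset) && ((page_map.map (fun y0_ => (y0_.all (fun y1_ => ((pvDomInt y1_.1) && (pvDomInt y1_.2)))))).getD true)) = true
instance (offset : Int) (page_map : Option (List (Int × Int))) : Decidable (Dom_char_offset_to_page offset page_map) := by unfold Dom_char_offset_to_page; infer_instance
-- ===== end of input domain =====

-- B replaces A's sort-then-scan-with-break by a single unsorted pass tracking the qualifying item with the maximal start (faster).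


-- ===== PORT A =====
-- the 'for … if start <= offset: page = pg else: break' loop, carrying 'page'
def pvLoopA (offset : Int) : Option Int → List (Int × Int) → Option Int
  | page, [] => page
  | page, (start, pg) :: t => if start ≤ offset then pvLoopA offset (some pg) t else page

-- sorted(page_map.items()): under Pre_ (distinct keys, as in any Python dict) Python's
-- lexicographic pair sort never compares the second components, so sorting by the key is exact.
def char_offset_to_page (offset : Int) (page_map : Option (List (Int × Int))) : Option Int :=
  match page_map with
  | none => none
  | some m => pvLoopA offset none (PySem.List.sorted m (fun p => p.1) false)

-- ===== PORT B =====
-- loop body of B: keep the qualifying (start, pg) with the largest start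
def pvBStep (offset : Int) (best : Option (Int × Int)) (p : Int × Int) : Option (Int × Int) :=
  match best with
  | none => if p.1 ≤ offset then some p else none
  | some b => if p.1 ≤ offset ∧ b.1 < p.1 then some p else some b

def char_offset_to_page_alt (offset : Int) (page_map : Option (List (Int × Int))) : Option Int :=
  match page_map with
  | none => none
  | some m => (m.foldl (pvBStep offset) none).map Prod.snd

-- ===== PRECONDITION & SPEC =====
-- Pre_ requires the association list's keys to be distinct, as they are for every Python dict
-- (page_map is dict[int, int] | None): it excludes no input the Python function can receive.
def Pre_char_offset_to_page (offset : Int) (page_map : Option (List (Int × Int))) : Prop :=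
  ((page_map.getD []).map Prod.fst).Nodup
instance (offset : Int) (page_map : Option (List (Int × Int))) : Decidable (Pre_char_offset_to_page offset page_map) := by unfold Pre_char_offset_to_page; infer_instance

def pvWitness_char_offset_to_page : Int × (Option (List (Int × Int))) := (5, some [(3, 2), (0, 1), (7, 3)])

def Spec_char_offset_to_page (offset : Int) (page_map : Option (List (Int × Int))) (out : Option Int) : Prop := out = char_offset_to_page_alt offset page_map
instance (offset : Int) (page_map : Option (List (Int × Int))) (out : Option Int) : Decidable (Spec_char_offset_to_page offset page_map out) := by unfold Spec_char_offset_to_page; infer_instance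

-- ===== CLAIM (what is proved, stated in full; the proofs are below) =====
def Claim_equal_char_offset_to_page : Prop := ∀ (offset : Int) (page_map : Option (List (Int × Int))), Dom_char_offset_to_page offset page_map → Pre_char_offset_to_page offset page_map → Spec_char_offset_to_page offset page_map (char_offset_to_page offset page_map)

-- ===== LEMMAS AND PROOFS =====

-- pvBStep is left-commutative on elements with distinct keys
theorem pvBStep_comm (offset : Int) (b : Option (Int × Int)) (x y : Int × Int) (hxy : x.1 ≠ y.1) :
    pvBStep offset (pvBStep offset b x) y = pvBStep offset (pvBStep offset b y) x := by
  rcases b with _ | b <;> simp only [pvBStep] <;> split_ifs <;>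
    simp only [pvBStep] <;> split_ifs <;> first | rfl | omega

-- folding pvBStep over items whose start all exceed the offset changes nothing
theorem foldl_pvBStep_const (offset : Int) (b : Option (Int × Int)) (s : List (Int × Int))
    (h : ∀ q ∈ s, offset < q.1) : s.foldl (pvBStep offset) b = b := by
  induction s generalizing b with
  | nil => rfl
  | cons q t ih =>
    have hq : offset < q.1 := h q (List.mem_cons_self)
    have hstep : pvBStep offset b q = b := by
      rcases b with _ | b <;> simp only [pvBStep] <;> rw [if_neg (by omega)]
    simpa [hstep] using ih b (fun r hr => h r (List.mem_cons_of_mem _ hr))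

-- on a list with strictly increasing keys, A's break-loop computes B's running maximum
theorem pvLoopA_eq_foldl (offset : Int) (s : List (Int × Int)) (b : Option (Int × Int))
    (hs : s.Pairwise (fun a c => a.1 < c.1))
    (hb : ∀ p, b = some p → ∀ q ∈ s, p.1 < q.1) :
    pvLoopA offset (b.map Prod.snd) s = (s.foldl (pvBStep offset) b).map Prod.snd := by
  induction s generalizing b with
  | nil => rfl
  | cons q t ih =>
    obtain ⟨hq, ht⟩ := List.pairwise_cons.mp hs
    by_cases hle : q.1 ≤ offset
    · have hstep : pvBStep offset b q = some q := by
        rcases b with _ | p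
        · simp [pvBStep, hle]
        · have := hb p rfl q (List.mem_cons_self)
          simp [pvBStep, hle, this]
      have := ih (some q) ht (by intro p hp; cases Option.some.inj hp; exact hq)
      simpa [pvLoopA, hle, hstep] using this
    · have hstep : pvBStep offset b q = b := by
        rcases b with _ | p <;> simp only [pvBStep] <;> rw [if_neg (by omega)]
      have hrest : t.foldl (pvBStep offset) b = b :=
        foldl_pvBStep_const offset b t (fun r hr => lt_trans (by omega) (hq r hr))
      rcases q with ⟨st, pg⟩
      simp [pvLoopA, hle, hstep, hrest]

-- ===== VERDICT (by name: the statement is the Claim_ definition above) =====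
theorem char_offset_to_page_spec : Claim_equal_char_offset_to_page := by
  intro offset page_map _ hpre
  unfold Spec_char_offset_to_page
  rcases page_map with _ | m
  · rfl
  · unfold char_offset_to_page char_offset_to_page_alt
    have hnodup : (m.map Prod.fst).Nodup := hpre
    set s := PySem.List.sorted m (fun p => p.1) false with hsdef
    have hperm : s.Perm m := PySem.List.sorted_perm m (fun p => p.1) false
    have hnods : (s.map Prod.fst).Nodup := ((hperm.map Prod.fst).nodup_iff).mpr hnodup
    have hne : s.Pairwise (fun a b : Int × Int => a.1 ≠ b.1) := List.pairwise_map.mp hnods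
    have hle : s.Pairwise (fun a b : Int × Int => a.1 ≤ b.1) :=
      PySem.List.sorted_pairwise m (fun p => p.1)
    have hs : s.Pairwise (fun a b : Int × Int => a.1 < b.1) :=
      (hle.and hne).imp fun h => lt_of_le_of_ne h.1 h.2
    have hinj : ∀ x ∈ m, ∀ y ∈ m, x.1 = y.1 → x = y := fun x hx y hy h =>
      List.inj_on_of_nodup_map hnodup hx hy h
    have hfold : m.foldl (pvBStep offset) none = s.foldl (pvBStep offset) none :=
      List.Perm.foldl_eq' hperm.symm
        (fun x hx y hy z => by
          by_cases hxy : x = y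
          · subst hxy; rfl
          · exact pvBStep_comm offset z x y (fun h => hxy (hinj x hx y hy h)))
        none
    dsimp only
    rw [hfold]
    simpa using pvLoopA_eq_foldl offset s none hs (by simp)
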